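-- pv_equiv track=rewrite | github.com/RokoOfficial/OPEN-ROKO | HMP/src/hmp/core/engine.py | _skip_block
-- ===== SOURCE A (Python) =====
-- from typing import Any, Dict, List, Optional
--
-- def _skip_block(
--
--     lines: List[str],
--     start: int,
--     start_keyword: str,
--     end_keyword: str
-- ) -> int:
--     """Pula um bloco de codigo."""
--     i = start + 1
--     depth = 1
--     while i < len(lines) and depth > 0:
--         line = lines[i].strip()
--         if line.startswith(start_keyword):
--             depth += 1
--         elif line == end_keyword:
--             depth -= 1
--         i += 1
--     return i - start - 1
-- ===== SOURCE B (Python) =====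
-- def _skip_block(lines, start, start_keyword, end_keyword):
--     """Skip a nested block: classify each line as a depth delta (+1/-1/0), take prefix
--     sums, and the block ends at the first prefix sum equal to -1 (depth 1 exhausted)."""
--     def delta(line):
--         s = line.strip()
--         if s.startswith(start_keyword):
--             return 1
--         if s == end_keyword:
--             return -1
--         return 0
--     deltas = [delta(lines[i]) for i in range(start + 1, len(lines))]
--     sums = []
--     total = 0
--     for d in deltas:
--         total += d
--         sums.append(total)
--     if -1 in sums:
--         return sums.index(-1) + 1
--     return len(deltas)
-- ===== Notes on version B (the rewrite author's own statement) =====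
-- stated objective: alternative
-- what changed: Replaces A's online depth-counter while loop with a staged pipeline: map each line to a depth delta (+1/-1/0), take prefix sums, and locate the block end as the first prefix sum equal to -1.
import Mathlib
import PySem

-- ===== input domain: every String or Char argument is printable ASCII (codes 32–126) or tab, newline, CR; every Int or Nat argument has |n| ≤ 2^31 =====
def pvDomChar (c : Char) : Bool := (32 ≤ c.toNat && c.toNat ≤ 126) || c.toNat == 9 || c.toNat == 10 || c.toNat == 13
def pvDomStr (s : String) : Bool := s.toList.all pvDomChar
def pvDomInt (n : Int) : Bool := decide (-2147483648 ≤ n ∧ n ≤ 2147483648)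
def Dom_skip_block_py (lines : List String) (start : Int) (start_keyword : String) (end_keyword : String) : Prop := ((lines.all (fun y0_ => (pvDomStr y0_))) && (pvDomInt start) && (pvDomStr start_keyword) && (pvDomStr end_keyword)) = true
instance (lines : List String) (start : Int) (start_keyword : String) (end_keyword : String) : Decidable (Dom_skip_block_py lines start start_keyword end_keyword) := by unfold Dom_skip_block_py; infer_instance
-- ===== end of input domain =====

-- B replaces A's online depth-counter loop by a staged pipeline: per-line depth deltas,
-- prefix sums, first prefix sum equal to -1 (objective: alternative decomposition; same cost).

-- ===== PORT A =====
-- A's while loop: state (i, depth); lines[i] is Python indexing (negative wraps);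
-- the `.getD ""` default is unreachable under Pre_ (which excludes exactly the IndexError inputs).
def skipA_loop (lines : List String) (start_keyword : String) (end_keyword : String)
    (i : Int) (depth : Int) : Int :=
  if h : i < (lines.length : Int) ∧ depth > 0 then
    let line := PySem.Str.strip ((PySem.List.pyGet? lines i).getD "")
    if PySem.Str.startswith line start_keyword then
      skipA_loop lines start_keyword end_keyword (i + 1) (depth + 1)
    else if line = end_keyword then
      skipA_loop lines start_keyword end_keyword (i + 1) (depth - 1)
    else
      skipA_loop lines start_keyword end_keyword (i + 1) depth
  else i
termination_by ((lines.length : Int) - i).toNat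
decreasing_by all_goals omega

def skip_block_py (lines : List String) (start : Int) (start_keyword : String) (end_keyword : String) : Int :=
  skipA_loop lines start_keyword end_keyword (start + 1) 1 - start - 1

-- ===== PORT B =====
-- B's delta(line): classify one line as a depth delta.
def deltaB (start_keyword : String) (end_keyword : String) (line : String) : Int :=
  if PySem.Str.startswith (PySem.Str.strip line) start_keyword then 1
  else if PySem.Str.strip line = end_keyword then -1
  else 0

-- B's `sums` loop: prefix sums of the delta list (append loop rendered as carry recursion).
def sumsB (total : Int) : List Int → List Int
  | [] => []
  | d :: ds => (total + d) :: sumsB (total + d) ds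

-- B: deltas comprehension, prefix sums, then `-1 in sums` / `sums.index(-1)`.
def skip_block_py_alt (lines : List String) (start : Int) (start_keyword : String) (end_keyword : String) : Int :=
  let deltas := (PySem.List.pyRange (start + 1) (lines.length : Int) 1).map
      (fun i => deltaB start_keyword end_keyword ((PySem.List.pyGet? lines i).getD ""))
  let sums := sumsB 0 deltas
  match PySem.List.index? sums (-1 : Int) with
  | some k => (k : Int) + 1
  | none => (deltas.length : Int)

-- ===== PRECONDITION & SPEC =====
-- Pre_ excludes exactly the inputs where A (and B) raise IndexError: start + 1 < -len(lines)
-- (the first lines-index access is out of range even for Python's negative indexing).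
def Pre_skip_block_py (lines : List String) (start : Int) (start_keyword : String) (end_keyword : String) : Prop :=
  -(lines.length : Int) ≤ start + 1
instance (lines : List String) (start : Int) (start_keyword : String) (end_keyword : String) : Decidable (Pre_skip_block_py lines start start_keyword end_keyword) := by unfold Pre_skip_block_py; infer_instance

def pvWitness_skip_block_py : List String × Int × String × String :=
  (["if x", "a", "end", "b"], 0, "if", "end")

def Spec_skip_block_py (lines : List String) (start : Int) (start_keyword : String) (end_keyword : String) (out : Int) : Prop := out = skip_block_py_alt lines start start_keyword end_keyword
instance (lines : List String) (start : Int) (start_keyword : String) (end_keyword : String) (out : Int) : Decidable (Spec_skip_block_py lines start start_keyword end_keyword out) := by unfold Spec_skip_block_py; infer_instance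

-- ===== CLAIM (what is proved, stated in full; the proofs are below) =====
def Claim_equal_skip_block_py : Prop := ∀ (lines : List String) (start : Int) (start_keyword : String) (end_keyword : String), Dom_skip_block_py lines start start_keyword end_keyword → Pre_skip_block_py lines start start_keyword end_keyword → Spec_skip_block_py lines start start_keyword end_keyword (skip_block_py lines start start_keyword end_keyword)

-- ===== LEMMAS AND PROOFS =====

-- Abstract run function: consume deltas while depth > 0, counting consumed entries.
def runD : List Int → Int → Nat
  | [], _ => 0
  | d :: ds, depth => if depth > 0 then 1 + runD ds (depth + d) else 0

theorem runD_nonpos (ds : List Int) (depth : Int) (h : ¬ depth > 0) : runD ds depth = 0 := by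
  cases ds <;> simp [runD, h]

-- A's loop equals i + runD over the tail delta list.
theorem skipA_eq_runD (lines : List String) (sk ek : String) (i d : Int) :
    skipA_loop lines sk ek i d =
      i + (runD ((PySem.List.pyRange i (lines.length : Int) 1).map
        (fun j => deltaB sk ek ((PySem.List.pyGet? lines j).getD ""))) d : Int) := by
  fun_induction skipA_loop lines sk ek i d with
  | case1 i d h line hst ih =>
    obtain ⟨hi, hd⟩ := h
    rw [PySem.List.pyRange_one_cons (by omega)]
    simp only [List.map_cons, runD, if_pos hd]
    have hst' : PySem.Str.startswith (PySem.Str.strip ((PySem.List.pyGet? lines i).getD "")) sk = true := hst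
    have hδ : deltaB sk ek ((PySem.List.pyGet? lines i).getD "") = 1 := by
      unfold deltaB; rw [if_pos hst']
    rw [ih, hδ]
    push_cast; ring
  | case2 i d h line hst heq ih =>
    obtain ⟨hi, hd⟩ := h
    rw [PySem.List.pyRange_one_cons (by omega)]
    simp only [List.map_cons, runD, if_pos hd]
    have hst' : ¬ PySem.Str.startswith (PySem.Str.strip ((PySem.List.pyGet? lines i).getD "")) sk = true := hst
    have heq' : PySem.Str.strip ((PySem.List.pyGet? lines i).getD "") = ek := heq
    have hδ : deltaB sk ek ((PySem.List.pyGet? lines i).getD "") = -1 := by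
      unfold deltaB; rw [if_neg hst', if_pos heq']
    rw [ih, hδ]
    push_cast; ring
  | case3 i d h line hst heq ih =>
    obtain ⟨hi, hd⟩ := h
    rw [PySem.List.pyRange_one_cons (by omega)]
    simp only [List.map_cons, runD, if_pos hd]
    have hst' : ¬ PySem.Str.startswith (PySem.Str.strip ((PySem.List.pyGet? lines i).getD "")) sk = true := hst
    have heq' : ¬ PySem.Str.strip ((PySem.List.pyGet? lines i).getD "") = ek := heq
    have hδ : deltaB sk ek ((PySem.List.pyGet? lines i).getD "") = 0 := by
      unfold deltaB; rw [if_neg hst', if_neg heq']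
    rw [ih, hδ]
    push_cast; ring
  | case4 i d h =>
    by_cases hd : d > 0
    · have hi : ¬ i < (lines.length : Int) := fun hc => h ⟨hc, hd⟩
      have : PySem.List.pyRange i (lines.length : Int) 1 = [] := by
        rw [PySem.List.pyRange_one]
        have : ((lines.length : Int) - i).toNat = 0 := by omega
        simp [this]
      simp [this, runD]
    · rw [runD_nonpos _ _ hd]; simp

-- deltas produced by deltaB are always 1, 0 or -1.
theorem deltaB_cases (sk ek line : String) :
    deltaB sk ek line = 1 ∨ deltaB sk ek line = 0 ∨ deltaB sk ek line = -1 := by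
  unfold deltaB
  split_ifs <;> simp

-- B's prefix-sum search equals runD, for deltas bounded below by -1.
theorem runD_eq_index (ds : List Int) (t d : Int) (hd : d > 0)
    (hb : ∀ x ∈ ds, x = 1 ∨ x = 0 ∨ x = -1) :
    (match PySem.List.index? (sumsB t ds) (t - d) with
      | some k => (k : Int) + 1
      | none => (ds.length : Int)) = (runD ds d : Int) := by
  induction ds generalizing t d with
  | nil => simp [sumsB, runD, PySem.List.index?]
  | cons x xs ih =>
    have hx := hb x (by simp)
    simp only [sumsB, runD, if_pos hd]
    by_cases hhit : t + x = t - d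
    · -- closing line of the outermost level: depth hits 0
      have hd0 : d + x = 0 := by omega
      rw [hhit, PySem.List.index?_cons_self]
      rw [runD_nonpos xs (d + x) (by omega)]
      simp
    · have hpos : d + x > 0 := by
        rcases hx with h1 | h0 | hm1 <;> omega
      rw [PySem.List.index?_cons_of_ne (sumsB (t + x) xs) hhit]
      have := ih (t + x) (d + x) hpos (fun y hy => hb y (by simp [hy]))
      have ht : t + x - (d + x) = t - d := by ring
      rw [ht] at this
      cases hidx : PySem.List.index? (sumsB (t + x) xs) (t - d) with
      | some k =>
        rw [hidx] at this
        simp only [Option.map_some]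
        simp at this ⊢
        rw [← this]; ring
      | none =>
        rw [hidx] at this
        simp only [Option.map_none]
        simp at this ⊢
        rw [this]; ring

-- ===== VERDICT (by name: the statement is the Claim_ definition above) =====
theorem skip_block_py_spec : Claim_equal_skip_block_py := by
  intro lines start sk ek _ _
  unfold Spec_skip_block_py
  simp only [skip_block_py, skip_block_py_alt]
  rw [skipA_eq_runD lines sk ek (start + 1) 1]
  have hrun := runD_eq_index
    ((PySem.List.pyRange (start + 1) (lines.length : Int) 1).map
      (fun i => deltaB sk ek ((PySem.List.pyGet? lines i).getD ""))) 0 1 (by omega)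
    (by intro x hx; simp only [List.mem_map] at hx; obtain ⟨j, _, rfl⟩ := hx
        exact deltaB_cases sk ek _)
  have h01 : (0 : Int) - 1 = -1 := by norm_num
  rw [h01] at hrun
  rw [hrun]
  ring
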